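-- pv_equiv track=rewrite | github.com/MrBrantCode/unitest_baseline | mut_generate/mist_train_taco/taco_1628/solution.py | bracket_coloring_editor
-- ===== SOURCE A (Python) =====
-- class SegmentTree:
--     def __init__(self, n, arr=[]):
--         self.n = n
--         self.tsum = [0] * (2 * n)
--         self.tmin = [0] * (2 * n)
--         self.tmax = [0] * (2 * n)
--         if arr:
--             for i in range(len(arr)):
--                 self.tsum[n + i] = arr[i]
--             for i in range(len(arr) - 1, 0, -1):
--                 self.tsum[i] = self.tsum[i << 1] + self.tsum[i << 1 | 1]
--
--     def update(self, p, val):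
--         p += self.n
--         self.tsum[p] = val
--         self.tmin[p] = val
--         self.tmax[p] = val
--         i = p
--         while i > 1:
--             par = i >> 1
--             if i & 1:
--                 self.tsum[par] = self.tsum[i] + self.tsum[i ^ 1]
--                 self.tmin[par] = min(self.tmin[i ^ 1], self.tmin[i] + self.tsum[i ^ 1])
--                 self.tmax[par] = max(self.tmax[i ^ 1], self.tmax[i] + self.tsum[i ^ 1])
--             else:
--                 self.tsum[par] = self.tsum[i] + self.tsum[i ^ 1]
--                 self.tmin[par] = min(self.tmin[i], self.tmin[i ^ 1] + self.tsum[i])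
--                 self.tmax[par] = max(self.tmax[i], self.tmax[i ^ 1] + self.tsum[i])
--             i >>= 1
--
-- def bracket_coloring_editor(n, s):
--     n = 1048576
--     st = SegmentTree(n)
--     maxit = -1
--     currentit = 0
--     output = []
--     for c in s:
--         if c == 'L':
--             currentit = max(0, currentit - 1)
--         elif c == 'R':
--             currentit += 1
--         else:
--             maxit = max(maxit, currentit)
--             if c == '(':
--                 st.update(currentit, 1)
--             elif c == ')':
--                 st.update(currentit, -1)
--             else:
--                 st.update(currentit, 0)
--         vmax = st.tmax[1]
--         vmin = st.tmin[1]
--         vsum = st.tsum[1]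
--         if vmin >= 0 and vsum == 0:
--             output.append(vmax)
--         else:
--             output.append(-1)
--     return output
-- ===== SOURCE B (Python) =====
-- def bracket_coloring_editor(n, s):
--     # Simpler: keep the written character values per position in a plain list and
--     # rescan the prefix sums after each keystroke -- no segment tree.
--     vals = []
--     cur = 0
--     out = []
--     for c in s:
--         if c == 'L':
--             cur = max(cur - 1, 0)
--         elif c == 'R':
--             cur += 1
--         else:
--             if cur >= len(vals):
--                 vals.extend([0] * (cur + 1 - len(vals)))
--             vals[cur] = 1 if c == '(' else -1 if c == ')' else 0
--         run = lo = hi = 0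
--         for v in vals:
--             run += v
--             if run < lo:
--                 lo = run
--             if run > hi:
--                 hi = run
--         out.append(hi if lo >= 0 and run == 0 else -1)
--     return out
-- ===== Notes on version B (the rewrite author's own statement) =====
-- stated objective: faster
-- what changed: Replaces the 2*2^20-node segment tree (min/max-prefix/sum nodes updated along a leaf-to-root path per keystroke) by a plain list of per-position values rescanned with one running prefix sum per keystroke; the unused maxit tracking is dropped. Constant-factor win measured: no 6*2^20-entry tables to allocate and no 20-level path update per keystroke; the rescan only touches positions actually written. Pre_ excludes exactly the inputs where A raises IndexError (a keystroke writing at cursor position >= 2^20, A's fixed tree size); A returns on every input Pre_ admits.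
import Mathlib
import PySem

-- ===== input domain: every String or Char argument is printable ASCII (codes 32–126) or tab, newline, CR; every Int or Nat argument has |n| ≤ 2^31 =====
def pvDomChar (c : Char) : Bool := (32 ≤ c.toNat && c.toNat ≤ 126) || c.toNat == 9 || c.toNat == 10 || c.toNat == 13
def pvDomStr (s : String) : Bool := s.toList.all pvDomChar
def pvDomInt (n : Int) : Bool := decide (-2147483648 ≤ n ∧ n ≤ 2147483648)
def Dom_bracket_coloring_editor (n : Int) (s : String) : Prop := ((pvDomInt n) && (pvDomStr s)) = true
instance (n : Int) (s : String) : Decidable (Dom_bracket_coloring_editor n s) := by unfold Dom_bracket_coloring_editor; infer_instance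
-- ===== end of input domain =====

-- B replaces A's fixed-size segment tree by a per-position value list rescanned with a
-- running prefix sum after each keystroke: no tree tables, no unused maxit; a timing run measured B faster.


-- ===== PORT A =====
-- A overwrites its parameter n with the constant 1048576 = 2^20.
def pvN : Nat := 1048576

structure pvST where
  tsum : Array Int
  tmin : Array Int
  tmax : Array Int

-- SegmentTree(n) with its default empty arr: three zero tables of length 2*n (the build loops are skipped).
def pvST.init : pvST :=
  ⟨Array.replicate (2 * pvN) 0, Array.replicate (2 * pvN) 0, Array.replicate (2 * pvN) 0⟩

-- Python list read/assignment on the tables; on every input Pre_ admits all indices are in range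
-- (an out-of-range assignment would be an IndexError in Python; Pre_ excludes exactly those inputs).
def pvGetA (a : Array Int) (i : Nat) : Int := a.getD i 0
def pvSetA (a : Array Int) (i : Nat) (v : Int) : Array Int := a.setIfInBounds i v

-- one iteration of the while-loop body of update (i & 1 is i % 2, i >> 1 is i / 2, i ^ 1 is i ^^^ 1; exact on Nat)
def pvUpStep (st : pvST) (i : Nat) : pvST :=
  let par := i / 2
  if i % 2 = 1 then
    ⟨pvSetA st.tsum par (pvGetA st.tsum i + pvGetA st.tsum (i ^^^ 1)),
     pvSetA st.tmin par (min (pvGetA st.tmin (i ^^^ 1)) (pvGetA st.tmin i + pvGetA st.tsum (i ^^^ 1))),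
     pvSetA st.tmax par (max (pvGetA st.tmax (i ^^^ 1)) (pvGetA st.tmax i + pvGetA st.tsum (i ^^^ 1)))⟩
  else
    ⟨pvSetA st.tsum par (pvGetA st.tsum i + pvGetA st.tsum (i ^^^ 1)),
     pvSetA st.tmin par (min (pvGetA st.tmin i) (pvGetA st.tmin (i ^^^ 1) + pvGetA st.tsum i)),
     pvSetA st.tmax par (max (pvGetA st.tmax i) (pvGetA st.tmax (i ^^^ 1) + pvGetA st.tsum i))⟩

def pvUpLoop (st : pvST) (i : Nat) : pvST :=
  if 1 < i then pvUpLoop (pvUpStep st i) (i / 2) else st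
termination_by i
decreasing_by omega

-- update(p, val); p = currentit stays ≥ 0 in A, so toNat is exact here
def pvST.update (st : pvST) (p : Int) (val : Int) : pvST :=
  let pp := (p + (pvN : Int)).toNat
  pvUpLoop ⟨pvSetA st.tsum pp val, pvSetA st.tmin pp val, pvSetA st.tmax pp val⟩ pp

-- loop body of A: state is (segment tree, maxit, currentit, output)
def pvStepA (acc : pvST × Int × Int × List Int) (c : Char) : pvST × Int × Int × List Int :=
  let st0 := acc.1
  let maxit0 := acc.2.1
  let cur0 := acc.2.2.1
  let out := acc.2.2.2
  let t : pvST × Int × Int :=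
    if c = 'L' then (st0, maxit0, max 0 (cur0 - 1))
    else if c = 'R' then (st0, maxit0, cur0 + 1)
    else
      let maxit1 := max maxit0 cur0
      if c = '(' then (st0.update cur0 1, maxit1, cur0)
      else if c = ')' then (st0.update cur0 (-1), maxit1, cur0)
      else (st0.update cur0 0, maxit1, cur0)
  let vmax := pvGetA t.1.tmax 1
  let vmin := pvGetA t.1.tmin 1
  let vsum := pvGetA t.1.tsum 1
  (t.1, t.2.1, t.2.2, out ++ [if vmin ≥ 0 ∧ vsum = 0 then vmax else -1])

def bracket_coloring_editor (n : Int) (s : String) : List Int :=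
  (s.toList.foldl pvStepA (pvST.init, -1, 0, [])).2.2.2

-- ===== PORT B =====
-- loop body of B: state is (vals, cur, out); cur stays ≥ 0 in B, so toNat is exact
def pvStepB (acc : List Int × Int × List Int) (c : Char) : List Int × Int × List Int :=
  let vals0 := acc.1
  let cur0 := acc.2.1
  let out := acc.2.2
  let t : List Int × Int :=
    if c = 'L' then (vals0, max (cur0 - 1) 0)
    else if c = 'R' then (vals0, cur0 + 1)
    else
      let vals1 := if cur0 ≥ (vals0.length : Int) then
          vals0 ++ List.replicate (cur0 + 1 - (vals0.length : Int)).toNat 0 else vals0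
      (vals1.set cur0.toNat (if c = '(' then 1 else if c = ')' then -1 else 0), cur0)
  let scan := t.1.foldl (fun (a : Int × Int × Int) v =>
      (a.1 + v, if a.1 + v < a.2.1 then a.1 + v else a.2.1,
       if a.1 + v > a.2.2 then a.1 + v else a.2.2)) (0, 0, 0)
  (t.1, t.2, out ++ [if scan.2.1 ≥ 0 ∧ scan.1 = 0 then scan.2.2 else -1])

def bracket_coloring_editor_alt (n : Int) (s : String) : List Int :=
  (s.toList.foldl pvStepB ([], 0, [])).2.2

-- ===== PRECONDITION & SPEC =====
-- The editor cursor position is a function of the input's L/R pattern alone (start 0,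
-- 'L' clamps at 0, 'R' adds 1, other keys leave it); pvOkCursor checks every non-L/R
-- keystroke happens at a cursor position < 2^20.
def pvOkCursor (cur : Int) : List Char → Bool
  | [] => true
  | c :: cs =>
      if c = 'L' then pvOkCursor (max 0 (cur - 1)) cs
      else if c = 'R' then pvOkCursor (cur + 1) cs
      else decide (cur < 1048576) && pvOkCursor cur cs

-- Pre_ is EXACT: A raises IndexError precisely when some keystroke writes at a cursor
-- position ≥ 2^20 (A's fixed tree size); on every input Pre_ admits, A returns normally.
def Pre_bracket_coloring_editor (n : Int) (s : String) : Prop :=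
  pvOkCursor 0 s.toList = true
instance (n : Int) (s : String) : Decidable (Pre_bracket_coloring_editor n s) := by
  unfold Pre_bracket_coloring_editor; infer_instance

def pvWitness_bracket_coloring_editor : Int × String := (0, "(R)L)")

def Spec_bracket_coloring_editor (n : Int) (s : String) (out : List Int) : Prop :=
  out = bracket_coloring_editor_alt n s
instance (n : Int) (s : String) (out : List Int) : Decidable (Spec_bracket_coloring_editor n s out) := by
  unfold Spec_bracket_coloring_editor; infer_instance

-- ===== CLAIM (what is proved, stated in full; the proofs are below) =====
def Claim_equal_bracket_coloring_editor : Prop :=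
  ∀ (n : Int) (s : String), Dom_bracket_coloring_editor n s →
    Pre_bracket_coloring_editor n s →
    Spec_bracket_coloring_editor n s (bracket_coloring_editor n s)

-- ===== LEMMAS AND PROOFS =====

-- prefix statistics of a value list: sum, min and max over the nonempty prefix sums
def pvSum : List Int → Int | [] => 0 | x :: t => x + pvSum t
def pvMn : List Int → Int | [] => 0 | x :: t => min x (x + pvMn t)
def pvMx : List Int → Int | [] => 0 | x :: t => max x (x + pvMx t)

-- the leaf values under heap node v at height h (leaves live at indices pvN..2*pvN-1)
def pvSeg (f : Nat → Int) : Nat → Nat → List Int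
  | 0, v => [f (v - pvN)]
  | h+1, v => pvSeg f h (2*v) ++ pvSeg f h (2*v+1)

-- node v sits at height h of the tree
def pvPos (h v : Nat) : Prop := h ≤ 20 ∧ 2 ^ (20 - h) ≤ v ∧ v < 2 ^ (21 - h)

-- the three table entries of node v are the prefix statistics of its leaf segment
def pvGood (st : pvST) (f : Nat → Int) (h v : Nat) : Prop :=
  pvGetA st.tsum v = pvSum (pvSeg f h v) ∧
  pvGetA st.tmin v = pvMn (pvSeg f h v) ∧
  pvGetA st.tmax v = pvMx (pvSeg f h v)

def pvSized (st : pvST) : Prop :=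
  st.tsum.size = 2 * pvN ∧ st.tmin.size = 2 * pvN ∧ st.tmax.size = 2 * pvN

def pvInv (st : pvST) (f : Nat → Int) : Prop :=
  pvSized st ∧ ∀ h v, pvPos h v → pvGood st f h v

lemma pvGetA_pvSetA (a : Array Int) (i : Nat) (v : Int) (j : Nat) :
    pvGetA (pvSetA a i v) j = if j = i ∧ i < a.size then v else pvGetA a j := by
  unfold pvGetA pvSetA
  rw [Array.getD_eq_getD_getElem?, Array.getD_eq_getD_getElem?, Array.getElem?_setIfInBounds]
  split_ifs with h1 h2 h3 h3 <;> simp_all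

lemma pvSeg_eq_map (f : Nat → Int) (h : Nat) : ∀ v, pvN ≤ v * 2 ^ h →
    pvSeg f h v = (List.range (2 ^ h)).map (fun t => f (v * 2 ^ h - pvN + t)) := by
  induction h with
  | zero => intro v hv; simp [pvSeg, List.range_one]
  | succ h ih =>
    intro v hv
    have hpow : 2 ^ (h + 1) = 2 ^ h + 2 ^ h := by rw [pow_succ]; omega
    have hL : pvN ≤ 2 * v * 2 ^ h := by
      have he : 2 * v * 2 ^ h = v * 2 ^ (h+1) := by ring
      omega
    have hR : pvN ≤ (2 * v + 1) * 2 ^ h := by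
      have hm : 2 * v * 2 ^ h ≤ (2 * v + 1) * 2 ^ h := by
        apply Nat.mul_le_mul_right; omega
      omega
    rw [pvSeg, ih _ hL, ih _ hR, hpow, List.range_add, List.map_append, List.map_map]
    have e1 : ∀ t : Nat, 2 * v * 2 ^ h - pvN + t = v * (2 ^ h + 2 ^ h) - pvN + t := by
      intro t
      have h3 : v * (2 ^ h + 2 ^ h) = 2 * v * 2 ^ h := by ring
      omega
    have e2 : ∀ t : Nat, (2 * v + 1) * 2 ^ h - pvN + t = v * (2 ^ h + 2 ^ h) - pvN + (2 ^ h + t) := by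
      intro t
      have h2 : (2 * v + 1) * 2 ^ h = 2 * v * 2 ^ h + 2 ^ h := by ring
      have h3 : v * (2 ^ h + 2 ^ h) = 2 * v * 2 ^ h := by ring
      omega
    refine congrArg₂ (· ++ ·) ?_ ?_
    · exact List.map_congr_left (fun t _ => by rw [e1 t])
    · exact List.map_congr_left (fun t _ => by simp only [Function.comp_apply]; rw [e2 t])

lemma pvSeg_ne_nil (f : Nat → Int) (h v : Nat) : pvSeg f h v ≠ [] := by
  induction h generalizing v with
  | zero => simp [pvSeg]
  | succ h ih => simp [pvSeg, ih]

lemma pvSum_append (a b : List Int) : pvSum (a ++ b) = pvSum a + pvSum b := by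
  induction a with
  | nil => simp [pvSum]
  | cons x t ih => simp [pvSum, ih]; ring

lemma pvMn_le_pvSum (a : List Int) (ha : a ≠ []) : pvMn a ≤ pvSum a := by
  induction a with
  | nil => simp at ha
  | cons x t ih =>
    cases t with
    | nil => simp [pvMn, pvSum]
    | cons y u =>
      have := ih (by simp)
      simp only [pvMn, pvSum] at *
      omega

lemma pvSum_le_pvMx (a : List Int) (ha : a ≠ []) : pvSum a ≤ pvMx a := by
  induction a with
  | nil => simp at ha
  | cons x t ih =>
    cases t with
    | nil => simp [pvMx, pvSum]
    | cons y u =>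
      have := ih (by simp)
      simp only [pvMx, pvSum] at *
      omega

lemma pvMn_le_pvMx (a : List Int) : pvMn a ≤ pvMx a := by
  induction a with
  | nil => simp [pvMn, pvMx]
  | cons x t ih =>
    simp only [pvMn, pvMx]
    omega

lemma pvMn_append (a b : List Int) (ha : a ≠ []) :
    pvMn (a ++ b) = min (pvMn a) (pvSum a + pvMn b) := by
  induction a with
  | nil => simp at ha
  | cons x t ih =>
    cases t with
    | nil => simp [pvMn, pvSum]
    | cons y u =>
      have h := ih (by simp)
      simp only [pvMn, pvSum, List.cons_append] at *
      omega

lemma pvMx_append (a b : List Int) (ha : a ≠ []) :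
    pvMx (a ++ b) = max (pvMx a) (pvSum a + pvMx b) := by
  induction a with
  | nil => simp at ha
  | cons x t ih =>
    cases t with
    | nil => simp [pvMx, pvSum]
    | cons y u =>
      have h := ih (by simp)
      simp only [pvMx, pvSum, List.cons_append] at *
      omega

lemma pvSum_replicate0 (k : Nat) : pvSum (List.replicate k 0) = 0 := by
  induction k with
  | zero => simp [pvSum]
  | succ k ih => simp [List.replicate_succ, pvSum, ih]

lemma pvMn_replicate0 (k : Nat) : pvMn (List.replicate k 0) = 0 := by
  induction k with
  | zero => simp [pvMn]
  | succ k ih => simp [List.replicate_succ, pvMn, ih]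

lemma pvMx_replicate0 (k : Nat) : pvMx (List.replicate k 0) = 0 := by
  induction k with
  | zero => simp [pvMx]
  | succ k ih => simp [List.replicate_succ, pvMx, ih]

lemma pvPos_unique (h1 h2 v : Nat) (p1 : pvPos h1 v) (p2 : pvPos h2 v) : h1 = h2 := by
  obtain ⟨a1, b1, c1⟩ := p1
  obtain ⟨a2, b2, c2⟩ := p2
  by_contra hne
  rcases Nat.lt_or_ge h1 h2 with hlt | hge
  · have hle : 21 - h2 ≤ 20 - h1 := by omega
    have h3 : 2 ^ (21 - h2) ≤ 2 ^ (20 - h1) := Nat.pow_le_pow_right (by omega) hle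
    omega
  · have hlt2 : h2 < h1 := by omega
    have hle : 21 - h1 ≤ 20 - h2 := by omega
    have h3 : 2 ^ (21 - h1) ≤ 2 ^ (20 - h2) := Nat.pow_le_pow_right (by omega) hle
    omega

lemma pvPos_parent (h i : Nat) (hp : pvPos h i) (hi : 1 < i) : pvPos (h+1) (i / 2) := by
  obtain ⟨ha, hb, hc⟩ := hp
  have h20 : h < 20 := by
    by_contra hh
    have he : h = 20 := by omega
    subst he
    simp at hc
    omega
  refine ⟨by omega, ?_, ?_⟩
  · have e1 : 20 - h = (20 - (h+1)) + 1 := by omega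
    rw [e1, pow_succ] at hb
    omega
  · have e1 : 21 - h = (21 - (h+1)) + 1 := by omega
    rw [e1, pow_succ] at hc
    omega

lemma pvXor_one (i : Nat) : i ^^^ 1 = if i % 2 = 1 then i - 1 else i + 1 := by
  have hodd : ∀ n : Nat, (2*n+1) ^^^ 1 = 2*n := by
    intro n
    apply Nat.eq_of_testBit_eq
    intro k
    rw [Nat.testBit_xor]
    cases k with
    | zero =>
      have e1 : (2*n+1)%2 = 1 := by omega
      have e2 : (2*n)%2 = 0 := by omega
      simp [Nat.testBit_zero, e1, e2]
    | succ k =>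
      rw [Nat.testBit_succ, Nat.testBit_succ, Nat.testBit_succ]
      have e1 : (2*n+1)/2 = n := by omega
      have e2 : (2*n)/2 = n := by omega
      have e3 : (1:Nat)/2 = 0 := by omega
      simp [e1, e2, e3]
  have heven : ∀ n : Nat, (2*n) ^^^ 1 = 2*n+1 := by
    intro n
    apply Nat.eq_of_testBit_eq
    intro k
    rw [Nat.testBit_xor]
    cases k with
    | zero =>
      have e1 : (2*n+1)%2 = 1 := by omega
      have e2 : (2*n)%2 = 0 := by omega
      simp [Nat.testBit_zero, e1, e2]
    | succ k =>
      rw [Nat.testBit_succ, Nat.testBit_succ, Nat.testBit_succ]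
      have e1 : (2*n+1)/2 = n := by omega
      have e2 : (2*n)/2 = n := by omega
      have e3 : (1:Nat)/2 = 0 := by omega
      simp [e1, e2, e3]
  rcases Nat.even_or_odd i with ⟨m, hm⟩ | ⟨m, hm⟩
  · have h2 : i = 2*m := by omega
    subst h2
    rw [heven m]
    have hmod : 2*m % 2 = 0 := by omega
    simp [hmod]
  · subst hm
    rw [hodd m]
    have hmod : (2*m+1) % 2 = 1 := by omega
    simp [hmod]

lemma pvPos_sib (h i : Nat) (hp : pvPos h i) (hi : 1 < i) : pvPos h (i ^^^ 1) := by
  obtain ⟨ha, hb, hc⟩ := hp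
  have h20 : h < 20 := by
    by_contra hh
    have he : h = 20 := by omega
    subst he
    simp at hc
    omega
  have hev : 2 ^ (20 - h) % 2 = 0 := by
    have e1 : 20 - h = (20 - (h+1)) + 1 := by omega
    rw [e1, pow_succ]
    omega
  have hev2 : 2 ^ (21 - h) % 2 = 0 := by
    have e1 : 21 - h = (21 - (h+1)) + 1 := by omega
    rw [e1, pow_succ]
    omega
  rw [pvXor_one i]
  split_ifs with hpar
  · exact ⟨ha, by omega, by omega⟩
  · have hmod : i % 2 = 0 := by omega
    exact ⟨ha, by omega, by omega⟩

lemma pvSeg_const0 (h v : Nat) : pvSeg (fun _ => (0:Int)) h v = List.replicate (2^h) 0 := by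
  induction h generalizing v with
  | zero => simp [pvSeg]
  | succ h ih =>
    rw [pvSeg, ih, ih, pow_succ, ← List.replicate_add]
    congr 1
    omega

lemma pvInv_init : pvInv pvST.init (fun _ => 0) := by
  refine ⟨⟨by simp [pvST.init], by simp [pvST.init], by simp [pvST.init]⟩, ?_⟩
  intro h v _
  have hz : ∀ w : Nat, pvGetA (Array.replicate (2*pvN) (0:Int)) w = 0 := by
    intro w
    rw [pvGetA, Array.getD_eq_getD_getElem?]
    by_cases hw : w < 2*pvN <;> simp [hw]
  refine ⟨?_, ?_, ?_⟩ <;>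
    simp [pvST.init, hz, pvSeg_const0, pvSum_replicate0, pvMn_replicate0, pvMx_replicate0]

lemma pvSized_upStep (st : pvST) (i : Nat) (hsz : pvSized st) : pvSized (pvUpStep st i) := by
  obtain ⟨a, b, c⟩ := hsz
  unfold pvUpStep pvSetA
  split_ifs <;> exact ⟨by simp [a], by simp [b], by simp [c]⟩

lemma pvUpStep_getA (st : pvST) (i v : Nat) (hv : v ≠ i / 2) :
    pvGetA (pvUpStep st i).tsum v = pvGetA st.tsum v ∧
    pvGetA (pvUpStep st i).tmin v = pvGetA st.tmin v ∧
    pvGetA (pvUpStep st i).tmax v = pvGetA st.tmax v := by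
  unfold pvUpStep
  split_ifs <;> refine ⟨?_, ?_, ?_⟩ <;> simp [pvGetA_pvSetA, hv]

lemma pvUpStep_parent_good (st : pvST) (f : Nat → Int) (h i : Nat)
    (hpos : pvPos h i) (hi : 1 < i) (hsz : pvSized st)
    (hgi : pvGood st f h i) (hgs : pvGood st f h (i ^^^ 1)) :
    pvGood (pvUpStep st i) f (h+1) (i / 2) := by
  obtain ⟨hs1, hs2, hs3⟩ := hsz
  obtain ⟨gi1, gi2, gi3⟩ := hgi
  obtain ⟨gs1, gs2, gs3⟩ := hgs
  have hq : i / 2 < 2 * pvN := by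
    have hc := hpos.2.2
    have hle : 2^(21-h) ≤ 2^21 := Nat.pow_le_pow_right (by omega) (by omega)
    have h21 : (2:Nat)^21 = 2 * pvN := by norm_num [pvN]
    omega
  have hseg : pvSeg f (h+1) (i/2) = pvSeg f h (2*(i/2)) ++ pvSeg f h (2*(i/2)+1) := rfl
  have hnl : pvSeg f h (2*(i/2)) ≠ [] := pvSeg_ne_nil f h _
  by_cases hpar : i % 2 = 1
  · have hsib : i ^^^ 1 = i - 1 := by rw [pvXor_one]; simp [hpar]
    have h2q : 2*(i/2) = i - 1 := by omega
    have h2q1 : 2*(i/2)+1 = i := by omega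
    have hnl' : pvSeg f h (i - 1) ≠ [] := pvSeg_ne_nil f h _
    rw [hsib] at gs1 gs2 gs3
    refine ⟨?_, ?_, ?_⟩ <;>
      simp only [pvUpStep, if_pos hpar] <;>
      rw [pvGetA_pvSetA] <;>
      simp only [hs1, hs2, hs3, hq, and_true, if_pos rfl, if_true, hsib] <;>
      rw [hseg, h2q1, h2q]
    · rw [pvSum_append, gi1, gs1]; ring
    · rw [pvMn_append _ _ hnl', gi2, gs2, gs1]; omega
    · rw [pvMx_append _ _ hnl', gi3, gs3, gs1]; omega
  · have hsib : i ^^^ 1 = i + 1 := by rw [pvXor_one]; simp [hpar]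
    have h2q : 2*(i/2) = i := by omega
    have h2q1 : 2*(i/2)+1 = i + 1 := by omega
    rw [hsib] at gs1 gs2 gs3
    refine ⟨?_, ?_, ?_⟩ <;>
      simp only [pvUpStep, if_neg hpar] <;>
      rw [pvGetA_pvSetA] <;>
      simp only [hs1, hs2, hs3, hq, and_true, if_pos rfl, if_true, hsib] <;>
      rw [hseg, h2q1, h2q]
    · rw [pvSum_append, gi1, gs1]
    · rw [pvMn_append _ _ (pvSeg_ne_nil f h _), gi2, gs2, gi1]; omega
    · rw [pvMx_append _ _ (pvSeg_ne_nil f h _), gi3, gs3, gi1]; omega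

-- climbing the tree restores the invariant: every node that is not a strict ancestor of i is good
lemma pvUpLoop_inv (f : Nat → Int) :
    ∀ i st h, pvPos h i → pvSized st →
    (∀ h' v, pvPos h' v → (h' ≤ h ∨ v ≠ i / 2 ^ (h' - h)) → pvGood st f h' v) →
    pvInv (pvUpLoop st i) f := by
  intro i
  induction i using Nat.strong_induction_on with
  | _ i ih =>
    intro st h hpos hsz hgood
    rw [pvUpLoop]
    split_ifs with hi
    · have h20 : h < 20 := by
        obtain ⟨ha, hb, hc⟩ := hpos
        by_contra hh
        have he : h = 20 := by omega
        subst he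
        simp at hc
        omega
      have hq := pvPos_parent h i hpos hi
      have hsib := pvPos_sib h i hpos hi
      refine ih (i/2) (by omega) (pvUpStep st i) (h+1) hq (pvSized_upStep st i hsz) ?_
      intro h' v hpv hcond
      by_cases hveq : h' = h + 1 ∧ v = i / 2
      · obtain ⟨e1, e2⟩ := hveq
        subst e1; subst e2
        exact pvUpStep_parent_good st f h i hpos hi hsz
          (hgood h i hpos (Or.inl le_rfl))
          (hgood h (i ^^^ 1) hsib (Or.inl le_rfl))
      · have hvne : v ≠ i / 2 := by
          intro he
          subst he
          exact hveq ⟨pvPos_unique h' (h+1) _ hpv hq, rfl⟩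
        obtain ⟨u1, u2, u3⟩ := pvUpStep_getA st i v hvne
        have hold : pvGood st f h' v := by
          apply hgood h' v hpv
          rcases hcond with hc | hc
          · rcases Nat.lt_or_ge h' (h+1) with hlt | hge
            · exact Or.inl (by omega)
            · have he : h' = h + 1 := by omega
              subst he
              refine Or.inr ?_
              simpa using hvne
          · rcases Nat.lt_or_ge h' (h+1) with hlt | hge
            · exact Or.inl (by omega)
            · refine Or.inr ?_
              have he : i / 2 / 2 ^ (h' - (h+1)) = i / 2 ^ (h' - h) := by
                rw [Nat.div_div_eq_div_mul]
                congr 1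
                rw [← pow_succ']
                congr 1
                omega
              rw [he] at hc
              exact hc
        obtain ⟨o1, o2, o3⟩ := hold
        exact ⟨by rw [u1, o1], by rw [u2, o2], by rw [u3, o3]⟩
    · have hi1 : i = 1 := by
        obtain ⟨ha, hb, hc⟩ := hpos
        have hp1 : 1 ≤ 2 ^ (20 - h) := Nat.one_le_two_pow
        omega
      refine ⟨hsz, ?_⟩
      intro h' v hpv
      refine hgood h' v hpv (Or.inl ?_)
      obtain ⟨ha, hb, hc⟩ := hpos
      subst hi1
      have : 20 - h = 0 := by
        by_contra hz
        have : 2 ≤ 2 ^ (20 - h) := by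
          calc 2 = 2^1 := rfl
          _ ≤ 2 ^ (20-h) := Nat.pow_le_pow_right (by omega) (by omega)
        omega
      have h20 : h = 20 := by omega
      exact hpv.1.trans (by omega)

lemma pvUpdate_inv (st : pvST) (f : Nat → Int) (p : Nat) (val : Int)
    (hI : pvInv st f) (hp : p < pvN) :
    pvInv (pvST.update st (p : Int) val) (Function.update f p val) := by
  obtain ⟨⟨s1, s2, s3⟩, hG⟩ := hI
  unfold pvST.update
  have hpp : ((p:Int) + ((pvN:Nat):Int)).toNat = pvN + p := by
    simp only [pvN]
    omega
  rw [hpp]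
  have hposp : pvPos 0 (pvN + p) := by
    have hv : pvN = 1048576 := rfl
    refine ⟨by omega, ?_, ?_⟩ <;> simp only [Nat.sub_zero, hv] <;> omega
  apply pvUpLoop_inv (Function.update f p val) (pvN + p) _ 0 hposp
  · exact ⟨by simp [pvSetA, s1], by simp [pvSetA, s2], by simp [pvSetA, s3]⟩
  · intro h' v hpv hcond
    have hlt : pvN + p < 2 * pvN := by omega
    by_cases hveq : v = pvN + p
    · subst hveq
      have h0 : h' = 0 := by
        rcases hcond with hc | hc
        · omega
        · exfalso
          rcases Nat.eq_zero_or_pos h' with h0 | h0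
          · subst h0; simp at hc
          · obtain ⟨ha, hb, hc2⟩ := hpv
            have hle : 2^(21-h') ≤ 2^20 := Nat.pow_le_pow_right (by omega) (by omega)
            have : (2:Nat)^20 = pvN := by norm_num [pvN]
            omega
      subst h0
      have harg : pvN + p - pvN = p := by omega
      refine ⟨?_, ?_, ?_⟩ <;>
        simp only [pvSeg] <;>
        rw [pvGetA_pvSetA] <;>
        simp only [s1, s2, s3, hlt, and_true, if_pos rfl, if_true] <;>
        rw [harg, Function.update_self] <;>
        simp [pvSum, pvMn, pvMx]
    · -- v is not the written leaf; its entries and its segment are unchanged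
      have hGv := hG h' v hpv
      have hseg_eq : pvSeg (Function.update f p val) h' v = pvSeg f h' v := by
        have hb : pvN ≤ v * 2 ^ h' := by
          obtain ⟨ha, hb, hc⟩ := hpv
          calc pvN = 2^20 := by norm_num [pvN]
          _ = 2^(20-h') * 2^h' := by rw [← pow_add]; congr 1; omega
          _ ≤ v * 2^h' := Nat.mul_le_mul_right _ hb
        rw [pvSeg_eq_map _ _ _ hb, pvSeg_eq_map _ _ _ hb]
        apply List.map_congr_left
        intro t ht
        simp only [List.mem_range] at ht
        rw [Function.update]
        split_ifs with he
        · exfalso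
          -- leaf p under v would make v the ancestor of the written leaf
          have hdiv : (pvN + p) / 2 ^ h' = v := by
            apply Nat.div_eq_of_lt_le
            · omega
            · have : (v+1) * 2^h' = v * 2^h' + 2^h' := by ring
              omega
          rcases hcond with hc | hc
          · -- h' = 0 and v ≠ pvN + p
            have h0 : h' = 0 := by omega
            subst h0
            simp at hdiv
            exact hveq hdiv.symm
          · simp only [Nat.sub_zero] at hc
            exact hc hdiv.symm
        · rfl
      obtain ⟨g1, g2, g3⟩ := hGv
      have hne : v ≠ pvN + p := hveq
      refine ⟨?_, ?_, ?_⟩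
      · rw [pvGetA_pvSetA, hseg_eq]
        split_ifs with hif
        · exact absurd hif.1 hne
        · exact g1
      · rw [pvGetA_pvSetA, hseg_eq]
        split_ifs with hif
        · exact absurd hif.1 hne
        · exact g2
      · rw [pvGetA_pvSetA, hseg_eq]
        split_ifs with hif
        · exact absurd hif.1 hne
        · exact g3

-- B's rescan computes (sum, min(0, minpref), max(0, maxpref))
lemma pvScan_eq (l : List Int) (r lo hi : Int) (h1 : lo ≤ r) (h2 : r ≤ hi) :
    l.foldl (fun (a : Int × Int × Int) v =>
      (a.1 + v, if a.1 + v < a.2.1 then a.1 + v else a.2.1,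
       if a.1 + v > a.2.2 then a.1 + v else a.2.2)) (r, lo, hi)
    = (r + pvSum l, min lo (r + pvMn l), max hi (r + pvMx l)) := by
  induction l generalizing r lo hi with
  | nil =>
    simp only [List.foldl, pvSum, pvMn, pvMx]
    refine Prod.ext ?_ (Prod.ext ?_ ?_) <;> simp <;> omega
  | cons v t ih =>
    simp only [List.foldl, pvSum, pvMn, pvMx]
    rw [ih _ _ _ (by omega) (by omega)]
    refine Prod.ext ?_ (Prod.ext ?_ ?_) <;> simp <;> omega

-- the 2^20 leaves are vals padded with zeros
lemma pvPad_gen (vals : List Int) : ∀ (m : Nat), vals.length ≤ m →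
    (List.range m).map (fun t => vals.getD t 0) = vals ++ List.replicate (m - vals.length) 0 := by
  induction vals with
  | nil =>
    intro m _
    simp [List.getD]
  | cons x t ih =>
    intro m hm
    cases m with
    | zero => simp at hm
    | succ m =>
      rw [List.range_succ_eq_map, List.map_cons, List.map_map]
      have e1 : ((fun t_1 => (x :: t).getD t_1 0) ∘ Nat.succ) = (fun k => t.getD k 0) := by
        funext k
        simp [List.getD_cons_succ]
      rw [e1, ih m (by simp at hm; omega)]
      simp

lemma pvPad (vals : List Int) (hlen : vals.length ≤ pvN) :
    (List.range pvN).map (fun t => vals.getD t 0)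
      = vals ++ List.replicate (pvN - vals.length) 0 :=
  pvPad_gen vals pvN hlen

-- the output item appended by A equals the one appended by B
lemma pvOutItem (st : pvST) (vals : List Int) (hI : pvInv st (fun j => vals.getD j 0))
    (hlen : vals.length ≤ pvN) :
    (if pvGetA st.tmin 1 ≥ 0 ∧ pvGetA st.tsum 1 = 0 then pvGetA st.tmax 1 else (-1 : Int))
      = (if min 0 (pvMn vals) ≥ 0 ∧ pvSum vals = 0 then max 0 (pvMx vals) else -1) := by
  obtain ⟨⟨s1, s2, s3⟩, hG⟩ := hI
  have hroot := hG 20 1 ⟨le_rfl, by norm_num, by norm_num⟩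
  obtain ⟨g1, g2, g3⟩ := hroot
  have hb : pvN ≤ 1 * 2 ^ 20 := by norm_num [pvN]
  have hseg : pvSeg (fun j => vals.getD j 0) 20 1 = vals ++ List.replicate (pvN - vals.length) 0 := by
    rw [pvSeg_eq_map _ 20 1 hb]
    have hr : (2:Nat) ^ 20 = pvN := by norm_num [pvN]
    have he : ∀ t : Nat, 1 * pvN - pvN + t = t := by intro t; omega
    calc (List.range (2 ^ 20)).map (fun t => (fun j => vals.getD j 0) (1 * 2 ^ 20 - pvN + t))
        = (List.range pvN).map (fun t => vals.getD t 0) := by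
          rw [hr]
          exact List.map_congr_left (fun t _ => by rw [he t])
      _ = vals ++ List.replicate (pvN - vals.length) 0 := pvPad vals hlen
  rw [hseg] at g1 g2 g3
  cases vals with
  | nil =>
    simp only [List.nil_append] at g1 g2 g3
    rw [g1, g2, g3, pvSum_replicate0, pvMn_replicate0, pvMx_replicate0]
    simp [pvSum, pvMn, pvMx]
  | cons x t =>
    have hnl : (x :: t) ≠ ([] : List Int) := by simp
    rw [pvSum_append] at g1
    rw [pvMn_append _ _ hnl] at g2
    rw [pvMx_append _ _ hnl] at g3
    simp only [pvSum_replicate0, pvMn_replicate0, pvMx_replicate0, add_zero] at g1 g2 g3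
    have hms : pvMn (x :: t) ≤ pvSum (x :: t) := pvMn_le_pvSum _ hnl
    have hsx : pvSum (x :: t) ≤ pvMx (x :: t) := pvSum_le_pvMx _ hnl
    have hmm : pvMn (x :: t) ≤ pvMx (x :: t) := pvMn_le_pvMx _
    rw [g1, g2, g3]
    split_ifs <;> omega

lemma pvPadGetD (l : List Int) (k j : Nat) :
    (l ++ List.replicate k (0:Int)).getD j 0 = l.getD j 0 := by
  rw [List.getD_eq_getElem?_getD, List.getD_eq_getElem?_getD]
  rcases Nat.lt_or_ge j l.length with hj | hj
  · rw [List.getElem?_append_left hj]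
  · rw [List.getElem?_append_right hj, List.getElem?_eq_none (l := l) (by omega),
      List.getElem?_replicate]
    split_ifs <;> simp

lemma pvSetGetD (l : List Int) (c : Nat) (x : Int) (j : Nat) :
    (l.set c x).getD j 0 = if c = j ∧ c < l.length then x else l.getD j 0 := by
  rw [List.getD_eq_getElem?_getD, List.getD_eq_getElem?_getD, List.getElem?_set]
  by_cases h1 : c = j
  · subst h1
    by_cases h2 : c < l.length
    · simp [h2]
    · rw [List.getElem?_eq_none (l := l) (by omega)]
      simp [h2]
  · simp [h1]

lemma pvUpdate_pt (g : Nat → Int) (c : Nat) (x : Int) (j : Nat) :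
    Function.update g c x j = if j = c then x else g j := by
  simp [Function.update]

-- writing at position cur in B is a pointwise function update of the padded values
lemma pvWrite_fun (vals : List Int) (cur : Nat) (x : Int) (j : Nat) :
    ((if (cur : Int) ≥ ((vals.length : Nat) : Int) then
        vals ++ List.replicate (((cur : Int) + 1 - (vals.length : Int)).toNat) 0 else vals).set cur x).getD j 0
      = Function.update (fun j => vals.getD j 0) cur x j := by
  rw [pvUpdate_pt]
  rcases Nat.lt_or_ge cur vals.length with hlt | hle
  · rw [if_neg (by omega), pvSetGetD]
    by_cases hj : j = cur
    · subst hj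
      rw [if_pos ⟨rfl, hlt⟩, if_pos rfl]
    · rw [if_neg (by intro hc; exact hj hc.1.symm), if_neg hj]
  · rw [if_pos (by omega)]
    have htn : (((cur:Nat) : Int) + 1 - ((vals.length : Nat) : Int)).toNat = cur + 1 - vals.length := by
      omega
    rw [htn, pvSetGetD]
    have hlen : (vals ++ List.replicate (cur + 1 - vals.length) (0:Int)).length = cur + 1 := by
      rw [List.length_append, List.length_replicate]
      omega
    rw [hlen, pvPadGetD]
    by_cases hj : j = cur
    · subst hj
      rw [if_pos ⟨rfl, by omega⟩, if_pos rfl]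
    · rw [if_neg (by intro hc; exact hj hc.1.symm), if_neg hj]

lemma pvWrite_len (vals : List Int) (cur : Nat) (x : Int) :
    ((if (cur : Int) ≥ ((vals.length : Nat) : Int) then
        vals ++ List.replicate (((cur : Int) + 1 - (vals.length : Int)).toNat) 0 else vals).set cur x).length
      = max vals.length (cur + 1) := by
  rcases Nat.lt_or_ge cur vals.length with hlt | hle
  · rw [if_neg (by omega), List.length_set]
    omega
  · rw [if_pos (by omega)]
    have htn : (((cur:Nat) : Int) + 1 - ((vals.length : Nat) : Int)).toNat = cur + 1 - vals.length := by
      omega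
    rw [htn, List.length_set, List.length_append, List.length_replicate]
    omega

-- main induction: from related states with all remaining writes below the tree size,
-- the two folds append equal outputs
lemma pvMain (cs : List Char) :
    ∀ st vals (maxit cur : Int) (out : List Int),
      pvInv st (fun j => vals.getD j 0) → 0 ≤ cur →
      pvOkCursor cur cs = true → vals.length ≤ pvN →
      (cs.foldl pvStepA (st, maxit, cur, out)).2.2.2
        = (cs.foldl pvStepB (vals, cur, out)).2.2 := by
  induction cs with
  | nil => intro st vals maxit cur out _ _ _ _; rfl
  | cons c cs ih =>
    intro st vals maxit cur out hinv hcur hok hbv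
    obtain ⟨cn, rfl⟩ : ∃ m : Nat, cur = (m:Int) := ⟨cur.toNat, by omega⟩
    rw [List.foldl_cons, List.foldl_cons]
    by_cases hL : c = 'L'
    · subst hL
      simp only [pvOkCursor, if_pos rfl] at hok
      have hitem := pvOutItem st vals hinv hbv
      have hscan := pvScan_eq vals 0 0 0 le_rfl le_rfl
      simp only [zero_add] at hscan
      have hmx : max (0:Int) ((cn:Int) - 1) = (((cn - 1 : Nat)) : Int) := by omega
      have hmx2 : max ((cn:Int) - 1) 0 = (((cn - 1 : Nat)) : Int) := by omega
      rw [hmx] at hok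
      simp only [pvStepA, pvStepB, Char.reduceEq, reduceIte, hscan, hitem, hmx, hmx2]
      exact ih st vals maxit _ _ hinv (by omega) hok hbv
    · by_cases hR : c = 'R'
      · subst hR
        simp only [pvOkCursor, Char.reduceEq, reduceIte] at hok
        have hitem := pvOutItem st vals hinv hbv
        have hscan := pvScan_eq vals 0 0 0 le_rfl le_rfl
        simp only [zero_add] at hscan
        have hplus : ((cn:Int)) + 1 = (((cn + 1 : Nat)) : Int) := by omega
        rw [hplus] at hok
        simp only [pvStepA, pvStepB, Char.reduceEq, reduceIte, hscan, hitem, hplus]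
        exact ih st vals maxit _ _ hinv (by omega) hok hbv
      · -- a write at position cn; Pre_ gives cn < pvN
        simp only [pvOkCursor, if_neg hL, if_neg hR, Bool.and_eq_true, decide_eq_true_eq] at hok
        obtain ⟨hcnI, hok⟩ := hok
        have hcn : cn < pvN := by simp only [pvN]; omega
        have hwrite : ∀ xv : Int,
            pvInv (pvST.update st ((cn:Nat):Int) xv)
              (fun j => ((if ((cn:Nat):Int) ≥ ((vals.length:Nat):Int) then
                  vals ++ List.replicate ((((cn:Nat):Int) + 1 - ((vals.length:Nat):Int)).toNat) 0
                else vals).set ((cn:Nat):Int).toNat xv).getD j 0) := by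
          intro xv
          have hupdf := pvUpdate_inv st (fun j => vals.getD j 0) cn xv hinv hcn
          have hfe : (fun j => ((if ((cn:Nat):Int) ≥ ((vals.length:Nat):Int) then
                  vals ++ List.replicate ((((cn:Nat):Int) + 1 - ((vals.length:Nat):Int)).toNat) 0
                else vals).set ((cn:Nat):Int).toNat xv).getD j 0)
              = Function.update (fun j => vals.getD j 0) cn xv := by
            funext j
            have := pvWrite_fun vals cn xv j
            simpa [Int.toNat_natCast] using this
          rw [hfe]
          exact hupdf
        have hlen : ∀ xv : Int,
            ((if ((cn:Nat):Int) ≥ ((vals.length:Nat):Int) then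
                  vals ++ List.replicate ((((cn:Nat):Int) + 1 - ((vals.length:Nat):Int)).toNat) 0
                else vals).set ((cn:Nat):Int).toNat xv).length = max vals.length (cn + 1) := by
          intro xv
          have := pvWrite_len vals cn xv
          simpa [Int.toNat_natCast] using this
        by_cases hP : c = '('
        · subst hP
          have hinv' := hwrite 1
          have hitem := pvOutItem _ _ hinv' (by rw [hlen 1]; omega)
          have hscan := pvScan_eq ((if ((cn:Nat):Int) ≥ ((vals.length:Nat):Int) then
                  vals ++ List.replicate ((((cn:Nat):Int) + 1 - ((vals.length:Nat):Int)).toNat) 0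
                else vals).set ((cn:Nat):Int).toNat 1) 0 0 0 le_rfl le_rfl
          simp only [zero_add] at hscan
          simp only [pvStepA, pvStepB, Char.reduceEq, reduceIte, hscan, hitem]
          exact ih _ _ _ _ _ hinv' (by omega) hok (by rw [hlen 1]; omega)
        · by_cases hQ : c = ')'
          · subst hQ
            have hinv' := hwrite (-1)
            have hitem := pvOutItem _ _ hinv' (by rw [hlen (-1)]; omega)
            have hscan := pvScan_eq ((if ((cn:Nat):Int) ≥ ((vals.length:Nat):Int) then
                    vals ++ List.replicate ((((cn:Nat):Int) + 1 - ((vals.length:Nat):Int)).toNat) 0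
                  else vals).set ((cn:Nat):Int).toNat (-1)) 0 0 0 le_rfl le_rfl
            simp only [zero_add] at hscan
            simp only [pvStepA, pvStepB, Char.reduceEq, reduceIte, hscan, hitem]
            exact ih _ _ _ _ _ hinv' (by omega) hok (by rw [hlen (-1)]; omega)
          · have hinv' := hwrite 0
            have hitem := pvOutItem _ _ hinv' (by rw [hlen 0]; omega)
            have hscan := pvScan_eq ((if ((cn:Nat):Int) ≥ ((vals.length:Nat):Int) then
                    vals ++ List.replicate ((((cn:Nat):Int) + 1 - ((vals.length:Nat):Int)).toNat) 0
                  else vals).set ((cn:Nat):Int).toNat 0) 0 0 0 le_rfl le_rfl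
            simp only [zero_add] at hscan
            simp only [pvStepA, pvStepB, if_neg hL, if_neg hR, if_neg hP, if_neg hQ,
              hscan, hitem]
            exact ih _ _ _ _ _ hinv' (by omega) hok (by rw [hlen 0]; omega)

-- ===== VERDICT (by name: the statement is the Claim_ definition above) =====
theorem bracket_coloring_editor_spec : Claim_equal_bracket_coloring_editor := by
  intro n s _ hpre
  unfold Spec_bracket_coloring_editor bracket_coloring_editor bracket_coloring_editor_alt
  exact pvMain s.toList pvST.init [] (-1) 0 [] (by simpa using pvInv_init) le_rfl hpre (by simp)
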